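-- pv_equiv track=rewrite | github.com/nitthilan/volumetric_video | encoder/nerf_roxel/iphone_data_loader.py | get_split_index
-- ===== SOURCE A (Python) =====
-- def get_split_index(max_img_idx, split):
--     skip_every = 6
--     test_idx = 0
--     val_idx = 1
--     idx_lst = []
--     for i in range(max_img_idx):
--         if(split == "test" and (i%skip_every == test_idx)):
--             idx_lst.append(i)
--         elif(split == "val" and (i%skip_every == val_idx)):
--             idx_lst.append(i)
--         elif(split == "train" and (i%skip_every != test_idx) and (i%skip_every != val_idx)):
--             idx_lst.append(i)
--
--     return idx_lst
-- ===== SOURCE B (Python) =====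
-- def get_split_index(max_img_idx, split):
--     skip_every = 6
--     residues = {"test": [0], "val": [1], "train": [2, 3, 4, 5]}.get(split, [])
--     idx_lst = []
--     for r in residues:
--         idx_lst.extend(range(r, max_img_idx, skip_every))
--     return sorted(idx_lst)
-- ===== Notes on version B (the rewrite author's own statement) =====
-- stated objective: simpler
-- what changed: B maps the split to its allowed residues mod 6 and emits each index class directly as an arithmetic progression range(r, max_img_idx, 6), then sorts the merged progressions, instead of A's scan over every index with a modulo-testing branch chain.
import Mathlib
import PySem

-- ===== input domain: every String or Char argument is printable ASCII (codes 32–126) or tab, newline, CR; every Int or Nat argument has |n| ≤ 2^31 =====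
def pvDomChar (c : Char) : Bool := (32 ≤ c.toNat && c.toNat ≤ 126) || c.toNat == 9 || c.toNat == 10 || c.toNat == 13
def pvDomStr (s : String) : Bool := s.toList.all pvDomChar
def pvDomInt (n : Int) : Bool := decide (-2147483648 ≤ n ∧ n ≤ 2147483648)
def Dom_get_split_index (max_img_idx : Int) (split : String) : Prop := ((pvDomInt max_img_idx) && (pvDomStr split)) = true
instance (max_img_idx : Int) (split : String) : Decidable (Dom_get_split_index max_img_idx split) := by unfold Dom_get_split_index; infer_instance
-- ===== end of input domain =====

-- B emits each split's index class as arithmetic progressions (one range per allowed residue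
-- mod 6, looked up in a dict) and sorts the merge, instead of scanning every index with a
-- modulo-test branch chain: simpler, and equal to A on all inputs.

-- ===== PORT A =====
def get_split_index (max_img_idx : Int) (split : String) : List Int :=
  let skip_every : Int := 6
  let test_idx : Int := 0
  let val_idx : Int := 1
  (PySem.List.pyRange 0 max_img_idx 1).foldl (fun idx_lst i =>
    if split == "test" && (PySem.Int.mod i skip_every == test_idx) then idx_lst ++ [i]
    else if split == "val" && (PySem.Int.mod i skip_every == val_idx) then idx_lst ++ [i]
    else if split == "train" && !(PySem.Int.mod i skip_every == test_idx)
            && !(PySem.Int.mod i skip_every == val_idx) then idx_lst ++ [i]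
    else idx_lst) []

-- ===== PORT B =====
def get_split_index_alt (max_img_idx : Int) (split : String) : List Int :=
  let residues : List Int :=
    PySem.Dict.getD (PySem.Dict.ofList [("test", ([0] : List Int)), ("val", [1]), ("train", [2, 3, 4, 5])]) split []
  PySem.List.sorted
    (residues.foldl (fun idx_lst r => idx_lst ++ PySem.List.pyRange r max_img_idx 6) [])
    (fun x => x) false

-- ===== PRECONDITION & SPEC =====
def Spec_get_split_index (max_img_idx : Int) (split : String) (out : List Int) : Prop := out = get_split_index_alt max_img_idx split
instance (max_img_idx : Int) (split : String) (out : List Int) : Decidable (Spec_get_split_index max_img_idx split out) := by unfold Spec_get_split_index; infer_instance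

-- ===== CLAIM (what is proved, stated in full; the proofs are below) =====
def Claim_equal_get_split_index : Prop := ∀ (max_img_idx : Int) (split : String), Dom_get_split_index max_img_idx split → Spec_get_split_index max_img_idx split (get_split_index max_img_idx split)

-- ===== LEMMAS AND PROOFS =====

-- a positive-step range has no duplicates
lemma nodup_pyRange_pos (a b : Int) {s : Int} (hs : 0 < s) :
    (PySem.List.pyRange a b s).Nodup := by
  rw [PySem.List.pyRange_of_pos a b hs]
  exact (List.nodup_range).map (by intro x y h; simp at h; omega)

-- core: sorting the concatenated residue progressions equals the ascending modulo filter of 0..n-1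
lemma sorted_flat_eq_filter (n : Int) (rs : List Int) (p : Int → Bool)
    (hrs : rs.Pairwise (· < ·)) (hb : ∀ r ∈ rs, 0 ≤ r ∧ r < 6)
    (hp : ∀ i, 0 ≤ i → (p i = true ↔ PySem.Int.mod i 6 ∈ rs)) :
    PySem.List.sorted (rs.foldl (fun acc r => acc ++ PySem.List.pyRange r n 6) []) (fun x => x) false
      = (PySem.List.pyRange 0 n 1).filter p := by
  rw [PySem.List.foldl_append_eq_flatMap, List.nil_append]
  apply PySem.List.sorted_eq_of_perm_of_pairwise_lt
  · rw [List.perm_ext_iff_of_nodup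
      ((PySem.List.nodup_pyRange_one 0 n).filter p)
      (List.nodup_flatMap.mpr ⟨fun r _ => nodup_pyRange_pos r n (by norm_num),
        by
          refine hrs.imp_of_mem ?_
          intro r r' hr hr' hlt x hx hx'
          have hbr := hb r hr; have hbr' := hb r' hr'
          rw [PySem.List.mem_pyRange_iff_of_pos (by norm_num)] at hx hx'
          obtain ⟨_, _, k, hk⟩ := hx; obtain ⟨_, _, k', hk'⟩ := hx'
          omega⟩)]
    intro x
    simp only [List.mem_filter, PySem.List.mem_pyRange_one, List.mem_flatMap,
      PySem.List.mem_pyRange_iff_of_pos (show (0:Int) < 6 by norm_num)]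
    have h6 : PySem.Int.mod x 6 = x % 6 := PySem.Int.mod_eq_emod_of_pos (by norm_num)
    constructor
    · rintro ⟨⟨h0, hn⟩, hpx⟩
      exact ⟨PySem.Int.mod x 6, (hp x h0).mp hpx, by omega, hn, by omega⟩
    · rintro ⟨r, hr, hle, hn, hd⟩
      have hbr := hb r hr
      have h0 : 0 ≤ x := by omega
      refine ⟨⟨h0, hn⟩, (hp x h0).mpr ?_⟩
      have : PySem.Int.mod x 6 = r := by omega
      rwa [this]
  · exact (PySem.List.pairwise_lt_pyRange_one 0 n).filter p

-- ===== VERDICT (by name: the statement is the Claim_ definition above) =====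
theorem get_split_index_spec : Claim_equal_get_split_index := by
  intro n split _
  show get_split_index n split = get_split_index_alt n split
  unfold get_split_index get_split_index_alt
  by_cases h1 : split = "test"
  · subst h1
    simp only [show (("test":String) == "test") = true by decide,
      show (("test":String) == "val") = false by decide,
      show (("test":String) == "train") = false by decide,
      Bool.true_and, Bool.false_and, Bool.false_eq_true, if_false,
      show PySem.Dict.getD (PySem.Dict.ofList [("test", ([0] : List Int)), ("val", [1]), ("train", [2, 3, 4, 5])]) "test" [] = [0] by decide]
    rw [PySem.List.foldl_append_if (fun i => PySem.Int.mod i 6 == 0) (fun i => i), List.nil_append, List.map_id']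
    exact (sorted_flat_eq_filter n [0] _ (by decide) (by decide)
      (fun i _ => by simp)).symm
  by_cases h2 : split = "val"
  · subst h2
    simp only [show (("val":String) == "test") = false by decide,
      show (("val":String) == "val") = true by decide,
      show (("val":String) == "train") = false by decide,
      Bool.true_and, Bool.false_and, Bool.false_eq_true, if_false,
      show PySem.Dict.getD (PySem.Dict.ofList [("test", ([0] : List Int)), ("val", [1]), ("train", [2, 3, 4, 5])]) "val" [] = [1] by decide]
    rw [PySem.List.foldl_append_if (fun i => PySem.Int.mod i 6 == 1) (fun i => i), List.nil_append, List.map_id']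
    exact (sorted_flat_eq_filter n [1] _ (by decide) (by decide)
      (fun i _ => by simp)).symm
  by_cases h3 : split = "train"
  · subst h3
    simp only [show (("train":String) == "test") = false by decide,
      show (("train":String) == "val") = false by decide,
      show (("train":String) == "train") = true by decide,
      Bool.true_and, Bool.false_and, Bool.false_eq_true, if_false,
      show PySem.Dict.getD (PySem.Dict.ofList [("test", ([0] : List Int)), ("val", [1]), ("train", [2, 3, 4, 5])]) "train" [] = [2, 3, 4, 5] by decide]
    rw [PySem.List.foldl_append_if (fun i => !(PySem.Int.mod i 6 == 0) && !(PySem.Int.mod i 6 == 1)) (fun i => i), List.nil_append, List.map_id']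
    refine (sorted_flat_eq_filter n [2, 3, 4, 5] _ (by decide) (by decide) ?_).symm
    intro i _
    have hnn := PySem.Int.mod_nonneg i (show (0:Int) < 6 by norm_num)
    have hlt := PySem.Int.mod_lt i (show (0:Int) < 6 by norm_num)
    simp only [Bool.and_eq_true, Bool.not_eq_eq_eq_not, Bool.not_true, beq_eq_false_iff_ne,
      ne_eq, List.mem_cons, List.not_mem_nil, or_false]
    omega
  · -- unknown split: A appends nothing, B has no residues
    have e : (PySem.Dict.ofList [("test", ([0] : List Int)), ("val", [1]), ("train", [2, 3, 4, 5])]).items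
        = [("test", ([0] : List Int)), ("val", [1]), ("train", [2, 3, 4, 5])] := by decide
    simp only [show (split == "test") = false by simp [h1],
      show (split == "val") = false by simp [h2],
      show (split == "train") = false by simp [h3],
      Bool.false_and, Bool.false_eq_true, if_false]
    rw [List.foldl_fixed]
    simp [PySem.Dict.getD, PySem.Dict.get?, e, List.find?,
      show ("test" == split) = false by simp [Ne.symm h1],
      show ("val" == split) = false by simp [Ne.symm h2],
      show ("train" == split) = false by simp [Ne.symm h3]]
    rfl
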